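-- pv_equiv track=rewrite | github.com/Fpg13/Project-MTLS | MTLSProject/Scripts/trainingmodules.py | getinputsvm
-- ===== SOURCE A (Python) =====
-- import itertools
-- import collections
--
-- def getinputsvm(dictionary,slidingsize):
--
--     flankingaa=[0,0,0,0,0,0,0,0,0,0,0,0,0,0,0,0,0,0,0,0]
--     amountflanking=slidingsize//2
--     aatoadd=[]
--
--     for i in range(amountflanking):
--         aatoadd=aatoadd+[flankingaa]
--         modifieddictionary=collections.OrderedDict() #flanking aa also stored, but without the topology.
--
--     for proteins in dictionary.keys():
--         modifieddictionary[proteins]=aatoadd+dictionary[proteins][0]+aatoadd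
--
--     #Storing sliding windows into lists
--
--     trainingsetaa=[] #training input
--
--     for proteins in modifieddictionary.keys():
--         sequence=modifieddictionary.get(proteins)
--         for i in range(len(sequence)-2*amountflanking):
--             tosave=sequence[i:(i+slidingsize)]
--             merged = list(itertools.chain(*tosave))
--             trainingsetaa.append(merged)
--
--     return(trainingsetaa)
-- ===== SOURCE B (Python) =====
-- def getinputsvm(dictionary, slidingsize):
--     # Pad once per protein, flatten the padded sequence once, and cut each
--     # training vector out of the flat list via precomputed prefix-sum offsets
--     # (no per-window re-flattening).
--     flank = slidingsize // 2
--     pad = [[0] * 20 for _ in range(flank)]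
--     out = []
--     for value in dictionary.values():
--         padded = pad + value[0] + pad
--         flat = []
--         offs = [0]
--         for aa in padded:
--             flat.extend(aa)
--             offs.append(len(flat))
--         for i in range(len(value[0])):
--             end = min(i + slidingsize, len(padded))
--             out.append(flat[offs[i]:offs[end]])
--     return out
-- ===== Notes on version B (the rewrite author's own statement) =====
-- stated objective: alternative
-- what changed: Instead of slicing the padded sequence and re-flattening every window with itertools.chain, B flattens each padded sequence once and cuts every training vector out of the flat list using precomputed prefix-sum offsets.
import Mathlib
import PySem

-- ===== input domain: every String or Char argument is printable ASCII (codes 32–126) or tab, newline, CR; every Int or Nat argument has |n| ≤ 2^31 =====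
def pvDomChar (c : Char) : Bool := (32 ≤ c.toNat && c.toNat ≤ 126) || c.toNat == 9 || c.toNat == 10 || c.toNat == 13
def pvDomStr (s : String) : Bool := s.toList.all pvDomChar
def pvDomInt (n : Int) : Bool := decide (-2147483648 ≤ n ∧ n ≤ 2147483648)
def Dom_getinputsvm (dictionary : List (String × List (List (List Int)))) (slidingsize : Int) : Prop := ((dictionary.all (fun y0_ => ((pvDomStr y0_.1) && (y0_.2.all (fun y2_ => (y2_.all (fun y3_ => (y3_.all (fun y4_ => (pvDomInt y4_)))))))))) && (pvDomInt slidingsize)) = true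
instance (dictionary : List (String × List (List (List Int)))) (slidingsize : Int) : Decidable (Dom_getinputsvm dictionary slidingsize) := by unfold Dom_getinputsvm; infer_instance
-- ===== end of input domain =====

-- B pads once per protein, flattens the padded sequence once and cuts each window
-- out of the flat list via prefix-sum offsets (no per-window re-flattening); proved
-- equal to A on all inputs where A returns (slidingsize ≥ 2, no empty protein entry).


-- ===== PORT A =====
def getinputsvm (dictionary : List (String × List (List (List Int)))) (slidingsize : Int) : List (List Int) :=
  let flankingaa : List Int := [0,0,0,0,0,0,0,0,0,0,0,0,0,0,0,0,0,0,0,0]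
  let amountflanking : Int := PySem.Int.floordiv slidingsize 2
  let aatoadd : List (List Int) :=
    (PySem.List.pyRange 0 amountflanking 1).foldl (fun acc _ => acc ++ [flankingaa]) []
  let d : PySem.Dict String (List (List (List Int))) := PySem.Dict.ofList dictionary
  let modifieddictionary : PySem.Dict String (List (List Int)) :=
    d.keys.foldl (fun m proteins =>
      -- dictionary[proteins][0]; Pre_ guarantees the value list is nonempty
      m.insert proteins (aatoadd ++ (PySem.List.pyGet? (d.getD proteins []) 0).getD [] ++ aatoadd))
      PySem.Dict.empty
  modifieddictionary.keys.foldl (fun trainingsetaa proteins =>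
    let sequence : List (List Int) := (modifieddictionary.get? proteins).getD []
    (PySem.List.pyRange 0 ((sequence.length : Int) - 2 * amountflanking) 1).foldl
      (fun trainingsetaa i =>
        let tosave := PySem.List.slice sequence (some i) (some (i + slidingsize))
        trainingsetaa ++ [tosave.flatten]) trainingsetaa) []

-- ===== PORT B =====
def getinputsvm_alt (dictionary : List (String × List (List (List Int)))) (slidingsize : Int) : List (List Int) :=
  let flank : Int := PySem.Int.floordiv slidingsize 2
  let pad : List (List Int) := (PySem.List.pyRange 0 flank 1).map (fun _ => List.replicate 20 0)
  (PySem.Dict.ofList dictionary).values.foldl (fun out value =>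
    let v0 : List (List Int) := (PySem.List.pyGet? value 0).getD []   -- value[0]; Pre_: nonempty
    let padded := pad ++ v0 ++ pad
    let fo : List Int × List Int :=
      padded.foldl (fun p aa => (p.1 ++ aa, p.2 ++ [((p.1 ++ aa).length : Int)])) ([], [(0 : Int)])
    let flat := fo.1
    let offs := fo.2
    (PySem.List.pyRange 0 (v0.length : Int) 1).foldl (fun out i =>
      let e : Int := min (i + slidingsize) (padded.length : Int)
      out ++ [PySem.List.slice flat (some (PySem.List.pyGetD offs i 0)) (some (PySem.List.pyGetD offs e 0))])
      out) []

-- ===== PRECONDITION & SPEC =====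
-- Pre_ excludes exactly the inputs where the Python A raises: slidingsize < 2
-- (UnboundLocalError: modifieddictionary is only created inside the flanking loop)
-- and dict entries whose value list is empty (IndexError on dictionary[proteins][0]).
def Pre_getinputsvm (dictionary : List (String × List (List (List Int)))) (slidingsize : Int) : Prop :=
  2 ≤ slidingsize ∧ ∀ v ∈ (PySem.Dict.ofList dictionary).values, v ≠ []
instance (dictionary : List (String × List (List (List Int)))) (slidingsize : Int) : Decidable (Pre_getinputsvm dictionary slidingsize) := by unfold Pre_getinputsvm; infer_instance
def pvWitness_getinputsvm : (List (String × List (List (List Int)))) × Int :=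
  ([("ab", [[[1, 0], [0, 1]]])], 3)

def Spec_getinputsvm (dictionary : List (String × List (List (List Int)))) (slidingsize : Int) (out : List (List Int)) : Prop := out = getinputsvm_alt dictionary slidingsize
instance (dictionary : List (String × List (List (List Int)))) (slidingsize : Int) (out : List (List Int)) : Decidable (Spec_getinputsvm dictionary slidingsize out) := by unfold Spec_getinputsvm; infer_instance

-- ===== CLAIM (what is proved, stated in full; the proofs are below) =====
def Claim_equal_getinputsvm : Prop := ∀ (dictionary : List (String × List (List (List Int)))) (slidingsize : Int), Dom_getinputsvm dictionary slidingsize → Pre_getinputsvm dictionary slidingsize → Spec_getinputsvm dictionary slidingsize (getinputsvm dictionary slidingsize)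

-- ===== LEMMAS AND PROOFS =====
-- generic fold helpers
theorem pvFoldlSingleton {α β : Type} (l : List α) (g : α → β) (acc : List β) :
    l.foldl (fun a x => a ++ [g x]) acc = acc ++ l.map g := by
  rw [PySem.List.foldl_append_eq_flatMap (fun x => [g x]) l acc, ← List.map_eq_flatMap]

theorem pvFoldlConst {α β : Type} (l : List α) (c : β) (acc : List β) :
    l.foldl (fun a _ => a ++ [c]) acc = acc ++ List.replicate l.length c := by
  induction l generalizing acc with
  | nil => simp
  | cons x l ih => simp [ih, List.replicate_succ]

-- prefix-sum offsets of a list of lists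
def pvOffs (L : List (List Int)) : List Int :=
  (List.range (L.length + 1)).map (fun j => (((L.take j).flatten.length : Nat) : Int))

theorem pvFoSpec (L : List (List Int)) (c : List Int) (os : List Int) :
    L.foldl (fun p aa => (p.1 ++ aa, p.2 ++ [((p.1 ++ aa).length : Int)])) (c, os)
      = (c ++ L.flatten,
         os ++ (List.range L.length).map (fun j => ((c.length + (L.take (j+1)).flatten.length : Nat) : Int))) := by
  induction L generalizing c os with
  | nil => simp
  | cons v L ih =>
    simp only [List.foldl_cons]
    rw [ih]
    refine Prod.ext ?_ ?_
    · simp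
    · simp only [List.length_cons, List.range_succ_eq_map, List.map_cons, List.map_map]
      simp [List.take_succ_cons, Function.comp, Nat.succ_eq_add_one, List.append_assoc]
      intro j _
      ring

theorem pvFoSpec0 (L : List (List Int)) :
    L.foldl (fun p aa => (p.1 ++ aa, p.2 ++ [((p.1 ++ aa).length : Int)])) ([], [(0:Int)])
      = (L.flatten, pvOffs L) := by
  rw [pvFoSpec]
  refine Prod.ext (by simp) ?_
  simp only [pvOffs, List.range_succ_eq_map, List.map_cons, List.map_map]
  simp [Function.comp]

theorem pvOffsGet (L : List (List Int)) (j : Nat) (hj : j ≤ L.length) :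
    PySem.List.pyGetD (pvOffs L) (j : Int) 0 = (((L.take j).flatten.length : Nat) : Int) := by
  rw [PySem.List.pyGetD_natCast]
  unfold pvOffs
  rw [List.getD_eq_getElem?_getD]
  simp [List.getElem?_map, List.getElem?_range (by omega : j < L.length + 1)]

theorem pvFlatSlice (L : List (List Int)) (a b : Nat) (hab : a ≤ b) :
    PySem.List.slice L.flatten (some (((L.take a).flatten.length : Nat) : Int))
      (some (((L.take b).flatten.length : Nat) : Int))
      = ((L.drop a).take (b - a)).flatten := by
  rw [PySem.List.slice_natCast]
  have hsplit : L.flatten = (L.take a).flatten ++ (L.drop a).flatten := by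
    rw [← List.flatten_append, List.take_append_drop]
  have htb : L.take b = L.take a ++ (L.drop a).take (b - a) := by
    rw [← List.take_add]; congr 1; omega
  have hlen : (L.take b).flatten.length - (L.take a).flatten.length
      = ((L.drop a).take (b - a)).flatten.length := by
    rw [htb, List.flatten_append, List.length_append]; omega
  rw [hsplit, List.drop_left, hlen]
  have hsplit2 : (L.drop a).flatten = ((L.drop a).take (b - a)).flatten ++ ((L.drop a).drop (b - a)).flatten := by
    rw [← List.flatten_append, List.take_append_drop]
  rw [hsplit2, List.take_left' rfl]


def pvZ20 : List Int := List.replicate 20 0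

def pvPad (s : Int) : List (List Int) :=
  List.replicate (PySem.Int.floordiv s 2).toNat pvZ20

-- the sliding windows for one protein, in the common form both ports reach
def pvWins (s : Int) (v0 : List (List Int)) : List (List Int) :=
  (List.range v0.length).map
    (fun k => (((pvPad s ++ v0 ++ pvPad s).drop k).take s.toNat).flatten)

theorem pvFloorCast (s : Int) (h2 : 2 ≤ s) :
    PySem.Int.floordiv s 2 = (((PySem.Int.floordiv s 2).toNat : Nat) : Int) := by
  rw [PySem.Int.floordiv_eq_ediv_of_pos (by norm_num)]
  omega

-- A reduces to pvWins over the dict's keys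
theorem pvA (dict : List (String × List (List (List Int)))) (s : Int) (h2 : 2 ≤ s) :
    getinputsvm dict s = (PySem.Dict.ofList dict).keys.flatMap
      (fun k => pvWins s ((PySem.List.pyGet? ((PySem.Dict.ofList dict).getD k []) 0).getD [])) := by
  have h0 : (0:Int) < s := by omega
  set fn : Nat := (PySem.Int.floordiv s 2).toNat with hfn
  have hf : PySem.Int.floordiv s 2 = (fn : Int) := pvFloorCast s h2
  simp only [getinputsvm]
  set d := PySem.Dict.ofList dict with hd
  -- the flanking list
  have haat : (PySem.List.pyRange 0 (PySem.Int.floordiv s 2) 1).foldl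
      (fun acc _ => acc ++ [([0,0,0,0,0,0,0,0,0,0,0,0,0,0,0,0,0,0,0,0] : List Int)]) []
      = pvPad s := by
    rw [pvFoldlConst]
    simp [PySem.List.length_pyRange_one, pvPad, pvZ20]
  rw [haat]
  set F : String → List (List Int) :=
    fun k => pvPad s ++ (PySem.List.pyGet? (d.getD k []) 0).getD [] ++ pvPad s with hF
  have hitems : (d.keys.foldl (fun m proteins =>
        m.insert proteins (pvPad s ++ (PySem.List.pyGet? (d.getD proteins []) 0).getD [] ++ pvPad s))
        PySem.Dict.empty).items = d.keys.map (fun k => (k, F k)) := by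
    rw [PySem.Dict.items_foldl_insert_fresh d.keys (fun a => a) F PySem.Dict.empty
      (by intro a _; exact PySem.Dict.contains_empty a) (by simp [hd])]
    rfl
  set modified := d.keys.foldl (fun m proteins =>
        m.insert proteins (pvPad s ++ (PySem.List.pyGet? (d.getD proteins []) 0).getD [] ++ pvPad s))
        PySem.Dict.empty with hmod
  have hkeys : modified.keys = d.keys := by
    simp only [PySem.Dict.keys, hitems, List.map_map]
    simp
  have hnd : d.keys.Nodup := PySem.Dict.nodup_keys_ofList dict
  have hget : ∀ k ∈ d.keys, (modified.get? k).getD [] = F k := by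
    intro k hk
    have : (k, F k) ∈ modified.items := by rw [hitems]; exact List.mem_map_of_mem hk
    rw [PySem.Dict.get?_of_mem_items modified this (by rw [hkeys]; exact hnd)]
    rfl
  rw [hkeys]
  rw [PySem.List.foldl_congr_mem d.keys _
    (fun acc k => acc ++ pvWins s ((PySem.List.pyGet? (d.getD k []) 0).getD [])) []
    ?_]
  · rw [PySem.List.foldl_append_eq_flatMap]; simp
  · intro acc k hk
    rw [pvFoldlSingleton]
    congr 1
    rw [hget k hk]
    -- lengths: F k = pvPad ++ v0 ++ pvPad
    set v0 := (PySem.List.pyGet? (d.getD k []) 0).getD [] with hv0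
    have hlen : ((F k).length : Int) - 2 * PySem.Int.floordiv s 2 = (v0.length : Int) := by
      simp only [hF, ← hv0, pvPad, List.length_append, List.length_replicate, hf]
      omega
    rw [hlen]
    rw [PySem.List.pyRange_one]
    simp only [Int.sub_zero, Int.toNat_natCast, List.map_map]
    unfold pvWins
    apply List.map_congr_left
    intro j hj
    simp only [Function.comp_apply]
    rw [Int.zero_add, PySem.List.slice_toNat (F k) (Int.natCast_nonneg j) (by omega)]
    simp only [Int.toNat_natCast]
    have hjs : ((j:Int) + s).toNat - j = s.toNat := by omega
    rw [hjs]

-- B reduces to the same form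
theorem pvB (dict : List (String × List (List (List Int)))) (s : Int) (h2 : 2 ≤ s) :
    getinputsvm_alt dict s = (PySem.Dict.ofList dict).keys.flatMap
      (fun k => pvWins s ((PySem.List.pyGet? ((PySem.Dict.ofList dict).getD k []) 0).getD [])) := by
  have h0 : (0:Int) < s := by omega
  have hs : ((s.toNat : Nat) : Int) = s := Int.toNat_of_nonneg (by omega)
  set fn : Nat := (PySem.Int.floordiv s 2).toNat with hfn
  have hf : PySem.Int.floordiv s 2 = (fn : Int) := pvFloorCast s h2
  have hfn2 : (fn : Int) = s / 2 := by
    rw [← hf]; exact PySem.Int.floordiv_eq_ediv_of_pos (by norm_num)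
  simp only [getinputsvm_alt]
  set d := PySem.Dict.ofList dict with hd
  have hnd : d.keys.Nodup := PySem.Dict.nodup_keys_ofList dict
  have hpad : (PySem.List.pyRange 0 (PySem.Int.floordiv s 2) 1).map (fun _ => List.replicate 20 (0:Int))
      = pvPad s := by
    rw [PySem.List.pyRange_one, List.map_map]
    simp only [Function.comp_def]
    rw [List.map_const']
    simp only [List.length_range, pvPad, hf, Int.sub_zero, Int.toNat_natCast, pvZ20]
  rw [hpad]
  rw [PySem.Dict.values_eq_map_keys d hnd []]
  rw [List.foldl_map]
  rw [PySem.List.foldl_congr_mem d.keys _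
    (fun out k => out ++ pvWins s ((PySem.List.pyGet? (d.getD k []) 0).getD [])) []
    ?_]
  · rw [PySem.List.foldl_append_eq_flatMap]; simp
  · intro acc k hk
    set v0 := (PySem.List.pyGet? (d.getD k []) 0).getD [] with hv0
    set L : List (List Int) := pvPad s ++ v0 ++ pvPad s with hL
    rw [pvFoSpec0 L]
    rw [pvFoldlSingleton]
    congr 1
    rw [PySem.List.pyRange_one]
    simp only [Int.sub_zero, Int.toNat_natCast, List.map_map]
    unfold pvWins
    apply List.map_congr_left
    intro j hj
    simp only [Function.comp_apply, Int.zero_add]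
    rw [List.mem_range] at hj
    have hLlen : L.length = v0.length + 2 * fn := by
      simp [hL, pvPad, pvZ20]; omega
    have hjL : j ≤ L.length := by omega
    set m : Nat := min (j + s.toNat) L.length with hm
    have he : min ((j : Int) + s) ((L.length : Int)) = ((m : Nat) : Int) := by omega
    rw [he, pvOffsGet L j hjL, pvOffsGet L m (by omega)]
    rw [pvFlatSlice L j m (by omega)]
    have hld : (L.drop j).length = L.length - j := by simp
    have : (L.drop j).take (m - j) = (L.drop j).take s.toNat := by
      by_cases hc : s.toNat ≤ L.length - j
      · congr 1; omega
      · rw [List.take_of_length_le (by omega), List.take_of_length_le (by omega)]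
    rw [this]


-- ===== VERDICT (by name: the statement is the Claim_ definition above) =====
theorem getinputsvm_spec : Claim_equal_getinputsvm := by
  intro dict s _ hpre
  unfold Spec_getinputsvm
  rw [pvA dict s hpre.1, pvB dict s hpre.1]
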